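-- pv_equiv track=rewrite | github.com/Lithicsoft/Neutron | search/safe.py | return_special_characters
-- ===== SOURCE A (Python) =====
-- def return_special_characters(text):
--     special_characters_dict = {
--         '"plus"': '+',
--         '"minus"': '-',
--         '"asterisk"': '*',
--         '"colon"': ':',
--         '"leftparen"': '(',
--         '"rightparen"': ')',
--         '"leftbracket"': '[',
--         '"rightbracket"': ']',
--         '"leftbrace"': '{',
--         '"rightbrace"': '}',
--         '"tilde"': '~',
--         '"questionmark"': '?',
--         '"backslash"': '\\'
--     }
--
--     for char, replacement in special_characters_dict.items():
--         text = text.replace(char, replacement)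
--
--     return text
-- ===== SOURCE B (Python) =====
-- def return_special_characters(text):
--     names = ('plus minus asterisk colon leftparen rightparen leftbracket '
--              'rightbracket leftbrace rightbrace tilde questionmark backslash').split()
--     table = {'"%s"' % name: char for name, char in zip(names, '+-*:()[]{}~?\\')}
--
--     out = []
--     i = 0
--     n = len(text)
--     while i < n:
--         for token, replacement in table.items():
--             if text.startswith(token, i):
--                 out.append(replacement)
--                 i += len(token)
--                 break
--         else:
--             out.append(text[i])
--             i += 1
--     return ''.join(out)
-- ===== Notes on version B (the rewrite author's own statement) =====
-- stated objective: alternative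
-- what changed: A makes 13 sequential full-text str.replace passes (one per token); B makes a single left-to-right scan over the text, dispatching each token through the table where it stands and copying other characters.
-- outside the precondition, e.g. on return_special_characters('"minus"plus"'): A returns '"minus+', B returns '-plus"'
import Mathlib
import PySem

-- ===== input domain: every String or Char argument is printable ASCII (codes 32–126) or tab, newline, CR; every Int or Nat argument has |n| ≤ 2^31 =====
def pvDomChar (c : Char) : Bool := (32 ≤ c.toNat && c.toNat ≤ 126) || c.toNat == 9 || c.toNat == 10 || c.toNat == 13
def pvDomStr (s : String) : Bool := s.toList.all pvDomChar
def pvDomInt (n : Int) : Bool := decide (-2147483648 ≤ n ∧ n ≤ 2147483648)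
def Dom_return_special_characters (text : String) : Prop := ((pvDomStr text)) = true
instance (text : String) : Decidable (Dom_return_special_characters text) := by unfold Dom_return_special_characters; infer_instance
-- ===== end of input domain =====

-- B replaces A's 13 sequential full-text `.replace` passes by ONE left-to-right scan that
-- dispatches each token where it stands (objective: alternative single-pass algorithm; not
-- measured faster). Pre_ excludes texts where occurrences of two DIFFERENT tokens overlap
-- (share a quote character, as in the cited excluded example), where A's pass order and B's leftmost scan may
-- defensibly pick different occurrences.

-- ===== PORT A =====
-- the dict literal of A, in insertion order
def pvPairs : List (String × String) :=
  [("\"plus\"", "+"), ("\"minus\"", "-"), ("\"asterisk\"", "*"), ("\"colon\"", ":"),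
   ("\"leftparen\"", "("), ("\"rightparen\"", ")"), ("\"leftbracket\"", "["),
   ("\"rightbracket\"", "]"), ("\"leftbrace\"", "{"), ("\"rightbrace\"", "}"),
   ("\"tilde\"", "~"), ("\"questionmark\"", "?"), ("\"backslash\"", "\\")]

def return_special_characters (text : String) : String :=
  pvPairs.foldl (fun t p => PySem.Str.replace t p.1 p.2) text

-- ===== PORT B =====
-- B's token table, built as B builds it: token names zipped with their replacement chars
def pvNames : List String :=
  ["plus", "minus", "asterisk", "colon", "leftparen", "rightparen", "leftbracket",
   "rightbracket", "leftbrace", "rightbrace", "tilde", "questionmark", "backslash"]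

def pvToks : List (List Char × Char) :=
  (pvNames.zip "+-*:()[]{}~?\\".toList).map (fun p => ('"' :: p.1.toList ++ ['"'], p.2))

-- every token is nonempty (needed by pvScan's termination)
theorem pvToks_ne_nil : ∀ p ∈ pvToks, p.1 ≠ [] := by decide

-- B's single pass: at each position try the tokens in dict order; on a match emit the
-- replacement and jump past the token, otherwise copy the character.
def pvScan : List Char → List Char
  | [] => []
  | c :: rest =>
    match h : pvToks.find? (fun p => p.1.isPrefixOf (c :: rest)) with
    | some p => p.2 :: pvScan ((c :: rest).drop p.1.length)
    | none => c :: pvScan rest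
termination_by l => l.length
decreasing_by
  · have hm := List.mem_of_find?_eq_some h
    have := pvToks_ne_nil _ hm
    simp only [List.length_drop, List.length_cons]
    have hlen : 1 ≤ p.1.length := by
      cases hp : p.1 with
      | nil => exact absurd hp this
      | cons a t => simp
    omega
  · simp

def return_special_characters_alt (text : String) : String :=
  String.ofList (pvScan text.toList)

-- ===== PRECONDITION & SPEC =====
-- Pre_ excludes texts containing an overlap of two DIFFERENT tokens (they can only overlap by
-- one shared quote character, i.e. the text contains t1 ++ tail t2 for two distinct tokens): there A's
-- 13 ordered passes and B's leftmost one-pass scan defensibly pick different occurrences.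
def Pre_return_special_characters (text : String) : Prop :=
  ∀ p ∈ pvToks, ∀ q ∈ pvToks, p.1 ≠ q.1 → ¬ (p.1 ++ q.1.tail) <:+: text.toList
instance (text : String) : Decidable (Pre_return_special_characters text) := by
  unfold Pre_return_special_characters; infer_instance

def pvWitness_return_special_characters : String := "a \"plus\" b"

def Spec_return_special_characters (text : String) (out : String) : Prop := out = return_special_characters_alt text
instance (text : String) (out : String) : Decidable (Spec_return_special_characters text out) := by unfold Spec_return_special_characters; infer_instance

-- ===== CLAIM (what is proved, stated in full; the proofs are below) =====
def Claim_equal_return_special_characters : Prop := ∀ (text : String), Dom_return_special_characters text → Pre_return_special_characters text → Spec_return_special_characters text (return_special_characters text)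

-- ===== LEMMAS AND PROOFS =====

-- static facts about the token table, all by decide
theorem pvToks_no_prefix : ∀ p ∈ pvToks, ∀ q ∈ pvToks, p.1 ≠ q.1 → ¬ p.1.isPrefixOf q.1 := by decide
theorem pvToks_head : ∀ p ∈ pvToks, p.1.head? = some '"' := by decide
theorem pvToks_mid : ∀ p ∈ pvToks, ∀ j < p.1.length - 1, 0 < j → p.1[j]? ≠ some '"' := by decide
theorem pvToks_repl_not_in : ∀ p ∈ pvToks, ∀ q ∈ pvToks, p.2 ∉ q.1 := by decide
theorem pvToks_repl_ne_quote : ∀ p ∈ pvToks, p.2 ≠ '"' := by decide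
theorem pvToks_keys_nodup : (pvToks.map (·.1)).Nodup := by decide

-- proof-side model of one `str.replace` pass (leftmost, non-overlapping)
def repC (old : List Char) (new : List Char) : List Char → List Char
  | [] => []
  | c :: t =>
    if h : old ≠ [] ∧ old <+: (c :: t) then new ++ repC old new ((c :: t).drop old.length)
    else c :: repC old new t
termination_by l => l.length
decreasing_by
  · simp only [List.length_drop, List.length_cons]
    have hlen : 1 ≤ old.length := by
      cases hp : old with
      | nil => exact absurd hp h.1
      | cons a t' => simp
    omega
  · simp

theorem repC_nil (old new : List Char) : repC old new [] = [] := by simp [repC]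

theorem replace_go_eq (old new : List Char) (h : old ≠ []) :
    ∀ fuel l acc, l.length ≤ fuel →
      PySem.Chars.replace.go old new fuel l acc = acc.reverse ++ repC old new l := by
  intro fuel
  induction fuel with
  | zero =>
    intro l acc hl
    have : l = [] := List.eq_nil_of_length_eq_zero (Nat.le_zero.mp hl)
    subst this
    simp [PySem.Chars.replace.go, repC_nil]
  | succ n ih =>
    intro l acc hl
    cases l with
    | nil => simp [PySem.Chars.replace.go, repC_nil]
    | cons c t =>
      rw [PySem.Chars.replace.go]
      by_cases hp : old <+: (c :: t)
      · have hp' : old.isPrefixOf (c :: t) = true := List.isPrefixOf_iff_prefix.mpr hp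
        rw [if_pos hp']
        have hlen : old.length ≥ 1 := by
          cases old with
          | nil => exact absurd rfl h
          | cons a o => simp
        have hdrop : ((c :: t).drop old.length).length ≤ n := by
          simp only [List.length_drop, List.length_cons]
          simp only [List.length_cons] at hl
          omega
        rw [ih _ _ hdrop]
        rw [repC, dif_pos ⟨h, hp⟩]
        simp
      · have hp' : ¬ old.isPrefixOf (c :: t) = true := fun hh => hp (List.isPrefixOf_iff_prefix.mp hh)
        rw [if_neg hp']
        have ht : t.length ≤ n := by simp only [List.length_cons] at hl; omega
        rw [ih _ _ ht]
        rw [repC, dif_neg (fun hh => hp hh.2)]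
        simp

theorem replace_eq (old new s : List Char) (h : old ≠ []) :
    PySem.Chars.replace s old new = repC old new s := by
  unfold PySem.Chars.replace
  rw [if_neg (by simpa using h)]
  simpa using replace_go_eq old new h s.length s [] le_rfl

-- A's sequence of passes, as a fold of repC
def foldseq (ts : List (List Char × Char)) (l : List Char) : List Char :=
  ts.foldl (fun s p => repC p.1 [p.2] s) l

theorem foldseq_nil (ts : List (List Char × Char)) : foldseq ts [] = [] := by
  induction ts with
  | nil => rfl
  | cons p ts ih => simpa [foldseq, repC_nil] using ih

-- any head prefix of a pass's output was already a head prefix, or contains the replacement char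
theorem prefix_of_repC (old : List Char) (r : Char) :
    ∀ m p', p' <+: repC old [r] m → p' <+: m ∨ r ∈ p' := by
  have key : ∀ n (m : List Char), m.length ≤ n → ∀ p', p' <+: repC old [r] m → p' <+: m ∨ r ∈ p' := by
    intro n
    induction n with
    | zero =>
      intro m hm p' hp
      have : m = [] := List.eq_nil_of_length_eq_zero (Nat.le_zero.mp hm)
      subst this
      rw [repC_nil] at hp
      left; exact hp
    | succ n ih =>
      intro m hm p' hp
      cases m with
      | nil => rw [repC_nil] at hp; left; exact hp
      | cons c t =>
        rw [repC] at hp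
        split_ifs at hp with hc
        · cases p' with
          | nil => left; exact List.nil_prefix
          | cons a p'' =>
            right
            have : a = r := by
              simp only [List.cons_append, List.nil_append] at hp
              exact ((List.cons_prefix_cons).mp hp).1
            simp [this]
        · cases p' with
          | nil => left; exact List.nil_prefix
          | cons a p'' =>
            obtain ⟨hac, hpre⟩ := (List.cons_prefix_cons).mp hp
            have ht : t.length ≤ n := by simp only [List.length_cons] at hm; omega
            rcases ih t ht p'' hpre with h1 | h2
            · left; exact hac ▸ (List.cons_prefix_cons).mpr ⟨rfl, h1⟩
            · right; exact List.mem_cons_of_mem _ h2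
  intro m; exact key m.length m le_rfl

-- a pass skips any region in which its token never starts
theorem repC_skip (old : List Char) (r : Char) :
    ∀ n l, (∀ j < n, ¬ old <+: l.drop j) → repC old [r] l = l.take n ++ repC old [r] (l.drop n) := by
  intro n
  induction n with
  | zero => intro l _; simp
  | succ n ih =>
    intro l h
    cases l with
    | nil => simp [repC_nil]
    | cons c t =>
      have h0 : ¬ old <+: (c :: t) := by simpa using h 0 (Nat.succ_pos n)
      rw [repC, dif_neg (fun hh => h0 hh.2)]
      rw [List.take_succ_cons, List.drop_succ_cons]
      have := ih t (fun j hj => by simpa [List.drop_succ_cons] using h (j + 1) (by omega))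
      rw [this]
      simp

-- splitting a prefix of an append
theorem prefix_append_split {p a b : List Char} (h : p <+: a ++ b) :
    p <+: a ∨ ∃ q, p = a ++ q ∧ q <+: b := by
  induction a generalizing p with
  | nil => right; exact ⟨p, by simp, by simpa using h⟩
  | cons x a' ih =>
    cases p with
    | nil => left; exact List.nil_prefix
    | cons y p' =>
      obtain ⟨hyx, hp'⟩ := (List.cons_prefix_cons).mp h
      rcases ih hp' with h1 | ⟨q, hq, hqb⟩
      · left; exact hyx ▸ (List.cons_prefix_cons).mpr ⟨rfl, h1⟩
      · right; exact ⟨q, by simp [hyx, hq], hqb⟩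

-- passes commute with a head character none of their tokens matches at
theorem foldseq_cons :
    ∀ ts, (∀ p ∈ ts, p ∈ pvToks) → ∀ c s, (∀ p ∈ ts, ¬ p.1 <+: (c :: s)) →
      foldseq ts (c :: s) = c :: foldseq ts s := by
  intro ts
  induction ts with
  | nil => intro _ c s _; rfl
  | cons p ts' ih =>
    intro hsub c s h
    have hp : ¬ p.1 <+: (c :: s) := h p (List.mem_cons_self ..)
    have hstep : repC p.1 [p.2] (c :: s) = c :: repC p.1 [p.2] s := by
      rw [repC, dif_neg (fun hh => hp hh.2)]
    show foldseq ts' (repC p.1 [p.2] (c :: s)) = c :: foldseq ts' (repC p.1 [p.2] s)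
    rw [hstep]
    apply ih (fun q hq => hsub q (List.mem_cons_of_mem _ hq))
    intro q hq hcontra
    have hqtoks : q ∈ pvToks := hsub q (List.mem_cons_of_mem _ hq)
    have hqs : ¬ q.1 <+: (c :: s) := h q (List.mem_cons_of_mem _ hq)
    cases hq1 : q.1 with
    | nil => exact hqs (hq1 ▸ List.nil_prefix)
    | cons a q' =>
      rw [hq1] at hcontra
      obtain ⟨hac, hpre⟩ := (List.cons_prefix_cons).mp hcontra
      rcases prefix_of_repC p.1 p.2 s q' hpre with h1 | h2
      · exact hqs (hq1 ▸ hac ▸ (List.cons_prefix_cons).mpr ⟨rfl, h1⟩)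
      · exact pvToks_repl_not_in p (hsub p (List.mem_cons_self ..)) q hqtoks
          (hq1 ▸ List.mem_cons_of_mem _ h2)

-- passes leave untouched a block in which none of their tokens ever starts
theorem foldseq_block :
    ∀ ts, (∀ p ∈ ts, p ∈ pvToks) → ∀ (u s : List Char),
      (∀ p ∈ ts, ∀ j < u.length, ¬ p.1 <+: ((u ++ s).drop j)) →
      foldseq ts (u ++ s) = u ++ foldseq ts s := by
  intro ts
  induction ts with
  | nil => intro _ u s _; rfl
  | cons p ts' ih =>
    intro hsub u s h
    have hstep : repC p.1 [p.2] (u ++ s) = u ++ repC p.1 [p.2] s := by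
      have := repC_skip p.1 p.2 u.length (u ++ s)
        (fun j hj => h p (List.mem_cons_self ..) j hj)
      rwa [List.take_left, List.drop_left] at this
    show foldseq ts' (repC p.1 [p.2] (u ++ s)) = u ++ foldseq ts' (repC p.1 [p.2] s)
    rw [hstep]
    apply ih (fun q hq => hsub q (List.mem_cons_of_mem _ hq))
    intro q hq j hj hcontra
    have hqtoks : q ∈ pvToks := hsub q (List.mem_cons_of_mem _ hq)
    rw [List.drop_append_of_le_length (Nat.le_of_lt hj)] at hcontra
    rcases prefix_append_split hcontra with h1 | ⟨q', hq', hq'pre⟩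
    · refine h q (List.mem_cons_of_mem _ hq) j hj ?_
      rw [List.drop_append_of_le_length (Nat.le_of_lt hj)]
      exact h1.trans (List.prefix_append _ _)
    · rcases prefix_of_repC p.1 p.2 s q' hq'pre with h2 | h3
      · refine h q (List.mem_cons_of_mem _ hq) j hj ?_
        rw [List.drop_append_of_le_length (Nat.le_of_lt hj), hq']
        exact (List.prefix_append_right_inj _).mpr h2
      · exact pvToks_repl_not_in p (hsub p (List.mem_cons_self ..)) q hqtoks
          (hq' ▸ List.mem_append_right _ h3)

-- the precondition on the list side
def PreL (l : List Char) : Prop :=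
  ∀ p ∈ pvToks, ∀ q ∈ pvToks, p.1 ≠ q.1 → ¬ (p.1 ++ q.1.tail) <:+: l

theorem PreL_mono {l l' : List Char} (h : l' <:+: l) (hp : PreL l) : PreL l' :=
  fun p hp1 q hq1 hne hinf => hp p hp1 q hq1 hne (hinf.trans h)

-- under PreL, no token other than t starts strictly inside an occurrence of t at the head
theorem no_inner_occurrence {t s : List Char} (pk : List Char × Char) (hpk : pk ∈ pvToks)
    (ht : t = pk.1) (hpre : PreL (t ++ s)) :
    ∀ q ∈ pvToks, q.1 ≠ t → ∀ j < t.length, ¬ q.1 <+: ((t ++ s).drop j) := by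
  intro q hq hne j hj hcontra
  rcases Nat.eq_zero_or_pos j with hj0 | hjpos
  · subst hj0
    simp only [List.drop_zero] at hcontra
    rcases List.prefix_or_prefix_of_prefix hcontra (List.prefix_append t s) with h1 | h2
    · exact pvToks_no_prefix q hq pk hpk (ht ▸ hne) (List.isPrefixOf_iff_prefix.mpr (ht ▸ h1))
    · exact pvToks_no_prefix pk hpk q hq (fun hh => hne (ht ▸ hh.symm))
        (List.isPrefixOf_iff_prefix.mpr (ht ▸ h2))
  · -- j > 0 : the occurrence would have to start at a quote inside t, i.e. at t's closing quote
    have hqhead : q.1.head? = some '"' := pvToks_head q hq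
    obtain ⟨a, q', hq1⟩ : ∃ a q', q.1 = a :: q' := by
      cases hqc : q.1 with
      | nil => rw [hqc] at hqhead; simp at hqhead
      | cons a q' => exact ⟨a, q', rfl⟩
    have ha : a = '"' := by rw [hq1] at hqhead; simpa using hqhead
    subst ha
    obtain ⟨tl, htl⟩ := hcontra
    have hquote : t[j]? = some '"' := by
      have h1 : ((t ++ s).drop j).head? = (t ++ s)[j]? := List.head?_drop ..
      have h2 : (t ++ s)[j]? = t[j]? := List.getElem?_append_left hj
      have h3 : ((t ++ s).drop j).head? = some '"' := by
        rw [← htl, hq1]; simp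
      rw [h1, h2] at h3; exact h3.symm ▸ rfl
    have hjlast : j = t.length - 1 := by
      by_contra hne'
      have hj' : j < pk.1.length := ht ▸ hj
      have hlast : t.length - 1 = pk.1.length - 1 := by rw [ht]
      have hmid := pvToks_mid pk hpk j (by omega) hjpos
      exact hmid (ht ▸ hquote)
    have hq'pre : q' <+: s := by
      have htail : ((t ++ s).drop j).tail = (t ++ s).drop (j + 1) := List.tail_drop ..
      have hjlen : j + 1 = t.length := by
        have : 1 ≤ t.length := by omega
        omega
      have h4 : q' <+: ((t ++ s).drop j).tail := by
        refine ⟨tl, ?_⟩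
        rw [← htl, hq1]; simp
      rw [htail, hjlen, List.drop_left] at h4
      exact h4
    have hinf : (pk.1 ++ q.1.tail) <:+: (t ++ s) := by
      refine List.IsPrefix.isInfix ?_
      rw [← ht, hq1]
      simpa using (List.prefix_append_right_inj t).mpr hq'pre
    exact hpre pk hpk q hq (fun hh => hne (ht ▸ hh.symm)) hinf

-- step equations for pvScan
theorem pvScan_none {c : Char} {rest : List Char}
    (hf : pvToks.find? (fun p => p.1.isPrefixOf (c :: rest)) = none) :
    pvScan (c :: rest) = c :: pvScan rest := by
  rw [pvScan]
  split
  · rename_i p heq; rw [hf] at heq; exact absurd heq (by simp)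
  · rfl

theorem pvScan_some {c : Char} {rest : List Char} {pk : List Char × Char}
    (hf : pvToks.find? (fun p => p.1.isPrefixOf (c :: rest)) = some pk) :
    pvScan (c :: rest) = pk.2 :: pvScan ((c :: rest).drop pk.1.length) := by
  rw [pvScan]
  split
  · rename_i p heq; rw [hf] at heq; cases heq; rfl
  · rename_i heq; rw [hf] at heq; exact absurd heq (by simp)

-- main invariant: under PreL the 13 sequential passes equal the single scan
theorem foldseq_eq_pvScan : ∀ l, PreL l → foldseq pvToks l = pvScan l := by
  have key : ∀ n l, l.length ≤ n → PreL l → foldseq pvToks l = pvScan l := by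
    intro n
    induction n with
    | zero =>
      intro l hl _
      have : l = [] := List.eq_nil_of_length_eq_zero (Nat.le_zero.mp hl)
      subst this
      rw [foldseq_nil, pvScan]
    | succ n ih =>
      intro l hl hpre
      cases l with
      | nil => rw [foldseq_nil, pvScan]
      | cons c rest =>
        cases hf : pvToks.find? (fun p => p.1.isPrefixOf (c :: rest)) with
        | none =>
          have hnp : ∀ p ∈ pvToks, ¬ p.1 <+: (c :: rest) := by
            intro p hp hcontra
            have := List.find?_eq_none.mp hf p hp
            exact this (List.isPrefixOf_iff_prefix.mpr hcontra)
          rw [foldseq_cons pvToks (fun p hp => hp) c rest hnp, pvScan_none hf]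
          congr 1
          exact ih rest (by simpa using Nat.lt_succ_iff.mp (by simpa using hl))
            (PreL_mono (List.IsSuffix.isInfix ⟨[c], rfl⟩) hpre)
        | some pk =>
          have hmem : pk ∈ pvToks := List.mem_of_find?_eq_some hf
          have hps := List.find?_some (p := fun q : List Char × Char => q.1.isPrefixOf (c :: rest)) hf
          have hpref : pk.1 <+: (c :: rest) := List.isPrefixOf_iff_prefix.mp hps
          obtain ⟨s, hs⟩ := hpref
          obtain ⟨ts1, ts2, hsplit⟩ := List.mem_iff_append.mp hmem
          have hne1 : pk.1 ≠ [] := pvToks_ne_nil pk hmem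
          have htlen : 1 ≤ pk.1.length := by
            cases hc : pk.1 with
            | nil => exact absurd hc hne1
            | cons a t' => simp
          -- members of ts1/ts2 are tokens and (for ts1) have keys different from pk's
          have hsub1 : ∀ p ∈ ts1, p ∈ pvToks := fun p hp => hsplit ▸ List.mem_append_left _ hp
          have hsub2 : ∀ p ∈ ts2, p ∈ pvToks :=
            fun p hp => hsplit ▸ List.mem_append_right _ (List.mem_cons_of_mem _ hp)
          have hkeys := pvToks_keys_nodup
          rw [hsplit] at hkeys
          simp only [List.map_append, List.map_cons] at hkeys
          have hkeys' := List.nodup_middle.mp hkeys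
          have hnm := (List.nodup_cons.mp hkeys').1
          have hne_ts1 : ∀ p ∈ ts1, p.1 ≠ pk.1 := by
            intro p hp hcontra
            exact hnm (List.mem_append_left _ (hcontra ▸ List.mem_map_of_mem hp))
          have hPreL : PreL (pk.1 ++ s) := by rw [hs]; exact hpre
          have hocc := no_inner_occurrence pk hmem rfl hPreL
          -- unfold the fold over the split token list
          have hfold : foldseq pvToks (c :: rest)
              = foldseq ts2 (repC pk.1 [pk.2] (foldseq ts1 (c :: rest))) := by
            rw [hsplit]; simp [foldseq, List.foldl_append]
          -- the passes before pk leave its occurrence alone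
          have hblock : foldseq ts1 (c :: rest) = pk.1 ++ foldseq ts1 s := by
            rw [← hs]
            exact foldseq_block ts1 hsub1 pk.1 s
              (fun p hp j hj => hocc p (hsub1 p hp) (hne_ts1 p hp) j hj)
          -- pk's own pass fires at the head
          have hfire : repC pk.1 [pk.2] (pk.1 ++ foldseq ts1 s)
              = pk.2 :: repC pk.1 [pk.2] (foldseq ts1 s) := by
            cases hc : pk.1 with
            | nil => exact absurd hc hne1
            | cons a t' =>
              rw [List.cons_append, repC,
                dif_pos ⟨by rw [← hc]; exact hne1, by rw [← List.cons_append, ← hc]; exact List.prefix_append ..⟩]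
              rw [← List.cons_append, ← hc, List.drop_left]
              simp
          -- the passes after pk pass over the emitted replacement char
          have hafter : foldseq ts2 (pk.2 :: repC pk.1 [pk.2] (foldseq ts1 s))
              = pk.2 :: foldseq ts2 (repC pk.1 [pk.2] (foldseq ts1 s)) := by
            apply foldseq_cons ts2 hsub2
            intro q hq hcontra
            have hqhead : q.1.head? = some '"' := pvToks_head q (hsub2 q hq)
            cases hqc : q.1 with
            | nil => rw [hqc] at hqhead; simp at hqhead
            | cons a q' =>
              rw [hqc] at hcontra hqhead
              have := ((List.cons_prefix_cons).mp hcontra).1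
              simp only [List.head?_cons, Option.some.injEq] at hqhead
              exact pvToks_repl_ne_quote pk hmem (this ▸ hqhead)
          -- reassemble the fold over the full token list on the tail
          have hre : foldseq ts2 (repC pk.1 [pk.2] (foldseq ts1 s)) = foldseq pvToks s := by
            rw [hsplit]; simp [foldseq, List.foldl_append]
          -- induction hypothesis on the tail
          have hslen : s.length ≤ n := by
            have := congrArg List.length hs
            simp only [List.length_append, List.length_cons] at this hl
            omega
          have hihs : foldseq pvToks s = pvScan s :=
            ih s hslen (PreL_mono (List.IsSuffix.isInfix ⟨pk.1, hs⟩) hpre)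
          -- the scan takes the same step
          have hscan : pvScan (c :: rest) = pk.2 :: pvScan s := by
            rw [pvScan_some hf]
            congr 1
            rw [← hs, List.drop_left]
          rw [hfold, hblock, hfire, hafter, hre, hihs, hscan]
  intro l hpre
  exact key l.length l le_rfl hpre

-- bridge: A's string-level fold computes foldseq over the token table
theorem fold_str_toList :
    ∀ (ps : List (String × String)) (s : String),
      (ps.foldl (fun t p => PySem.Str.replace t p.1 p.2) s).toList
        = (ps.map (fun p => (p.1.toList, p.2.toList))).foldl
            (fun m q => PySem.Chars.replace m q.1 q.2) s.toList := by
  intro ps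
  induction ps with
  | nil => intro s; rfl
  | cons p ps ih =>
    intro s
    simp only [List.foldl_cons, List.map_cons]
    rw [ih]
    congr 1
    simp [PySem.Str.replace]

theorem pvPairs_map :
    pvPairs.map (fun p => (p.1.toList, p.2.toList)) = pvToks.map (fun q => (q.1, [q.2])) := by
  decide

theorem a_toList (text : String) :
    (return_special_characters text).toList = foldseq pvToks text.toList := by
  rw [return_special_characters, fold_str_toList, pvPairs_map, List.foldl_map]
  unfold foldseq
  apply PySem.List.foldl_congr_mem
  intro m q hq
  exact replace_eq q.1 [q.2] m (pvToks_ne_nil q hq)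

-- ===== VERDICT (by name: the statement is the Claim_ definition above) =====
theorem return_special_characters_spec : Claim_equal_return_special_characters := by
  intro text _ hpre
  unfold Spec_return_special_characters return_special_characters_alt
  have h1 : (return_special_characters text).toList = pvScan text.toList :=
    (a_toList text).trans (foldseq_eq_pvScan text.toList hpre)
  calc return_special_characters text
      = String.ofList (return_special_characters text).toList := (String.ofList_toList).symm
    _ = String.ofList (pvScan text.toList) := by rw [h1]
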